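-- pv_equiv track=rewrite | github.com/jonjicjan/SmartSettle-Payment-Routing-Settlement-Optimizer | scripts/compute_settle_output.py | has_capacity
-- ===== SOURCE A (Python) =====
-- from typing import Dict, List, Optional, Tuple
--
-- def has_capacity(
--     slots: List[Tuple[int, int, str]], cap: int, start: int, end: int
-- ) -> bool:
--     for t in range(start, end):
--         concurrent = sum(1 for s, e, _ in slots if t >= s and t < e)
--         if concurrent >= cap:
--             return False
--     return True
-- ===== SOURCE B (Python) =====
-- def has_capacity(slots, cap, start, end):
--     # Coverage over [start, end) can only increase at a slot's start time, so it
--     # suffices to check 'start' and each slot start strictly inside the range,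
--     # instead of every integer time point.
--     if start >= end:
--         return True
--     candidates = [start] + [s for s, e, _ in slots if start < s < end]
--     for t in candidates:
--         concurrent = sum(1 for s, e, _ in slots if s <= t < e)
--         if concurrent >= cap:
--             return False
--     return True
-- ===== Notes on version B (the rewrite author's own statement) =====
-- stated objective: alternative
-- what changed: Instead of scanning every integer time point in [start,end), B checks concurrency only at the candidate points where coverage can increase (start and each slot start inside the range), so its cost is independent of the range length.
import Mathlib
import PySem

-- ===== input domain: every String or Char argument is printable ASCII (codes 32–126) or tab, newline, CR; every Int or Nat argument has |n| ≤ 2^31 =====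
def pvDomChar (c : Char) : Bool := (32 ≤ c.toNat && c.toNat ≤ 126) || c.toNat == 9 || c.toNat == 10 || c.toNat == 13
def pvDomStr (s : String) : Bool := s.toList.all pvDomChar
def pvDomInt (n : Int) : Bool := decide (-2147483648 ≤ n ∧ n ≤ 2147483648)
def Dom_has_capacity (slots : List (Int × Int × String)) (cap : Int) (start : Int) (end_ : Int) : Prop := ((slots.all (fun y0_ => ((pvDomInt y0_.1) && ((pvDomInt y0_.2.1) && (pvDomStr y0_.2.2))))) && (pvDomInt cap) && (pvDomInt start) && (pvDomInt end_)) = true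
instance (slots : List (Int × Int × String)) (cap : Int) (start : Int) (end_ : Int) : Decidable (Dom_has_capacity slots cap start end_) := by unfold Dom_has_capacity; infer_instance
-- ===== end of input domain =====

-- B checks concurrency only at candidate points (start and each slot start inside the range)
-- instead of at every integer time point of [start, end): same result, cost independent of end-start.

-- ===== PORT A =====
-- sum(1 for s, e, _ in slots if t >= s and t < e)
def pvConcurrentA (slots : List (Int × Int × String)) (t : Int) : Int :=
  ((slots.filter (fun x => decide (t ≥ x.1 ∧ t < x.2.1))).length : Int)

-- for t in range(start, end): if concurrent >= cap: return False; return True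
-- (the for-loop with its early return, recursing over the same t = start, start+1, …)
def pvLoopA (slots : List (Int × Int × String)) (cap : Int) (t : Int) (end_ : Int) : Bool :=
  if h : t < end_ then
    if pvConcurrentA slots t ≥ cap then false
    else pvLoopA slots cap (t + 1) end_
  else true
termination_by (end_ - t).toNat
decreasing_by omega

def has_capacity (slots : List (Int × Int × String)) (cap : Int) (start : Int) (end_ : Int) : Bool :=
  pvLoopA slots cap start end_

-- ===== PORT B =====
-- sum(1 for s, e, _ in slots if s <= t < e)
def pvConcurrentB (slots : List (Int × Int × String)) (t : Int) : Int :=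
  ((slots.filter (fun x => decide (x.1 ≤ t ∧ t < x.2.1))).length : Int)

def has_capacity_alt (slots : List (Int × Int × String)) (cap : Int) (start : Int) (end_ : Int) : Bool :=
  if start ≥ end_ then true
  else
    (start :: slots.filterMap (fun x => if start < x.1 ∧ x.1 < end_ then some x.1 else none)).all
      (fun t => !(decide (pvConcurrentB slots t ≥ cap)))

-- ===== PRECONDITION & SPEC =====
def Spec_has_capacity (slots : List (Int × Int × String)) (cap : Int) (start : Int) (end_ : Int) (out : Bool) : Prop := out = has_capacity_alt slots cap start end_
instance (slots : List (Int × Int × String)) (cap : Int) (start : Int) (end_ : Int) (out : Bool) : Decidable (Spec_has_capacity slots cap start end_ out) := by unfold Spec_has_capacity; infer_instance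

-- ===== CLAIM (what is proved, stated in full; the proofs are below) =====
def Claim_equal_has_capacity : Prop := ∀ (slots : List (Int × Int × String)) (cap : Int) (start : Int) (end_ : Int), Dom_has_capacity slots cap start end_ → Spec_has_capacity slots cap start end_ (has_capacity slots cap start end_)

-- ===== LEMMAS AND PROOFS =====

theorem pvLoopA_eq (slots : List (Int × Int × String)) (cap t end_ : Int) :
    pvLoopA slots cap t end_
      = (PySem.List.pyRange t end_ 1).all (fun u => !(decide (pvConcurrentA slots u ≥ cap))) := by
  induction hn : (end_ - t).toNat generalizing t with
  | zero =>
    have hle : end_ ≤ t := by omega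
    rw [pvLoopA, dif_neg (not_lt.mpr hle), PySem.List.pyRange_one_eq_nil hle]
    rfl
  | succ n ih =>
    have hlt : t < end_ := by omega
    rw [pvLoopA, dif_pos hlt, PySem.List.pyRange_one_cons hlt, List.all_cons]
    by_cases hc : pvConcurrentA slots t ≥ cap
    · simp [hc]
    · rw [if_neg hc, ih (t + 1) (by omega)]
      simp [hc]

-- proof-side helper: the greatest candidate point ≤ t (start, or a slot start in (start, t])
def pvBest (slots : List (Int × Int × String)) (start t : Int) : Int :=
  slots.foldl (fun m x => if start < x.1 ∧ x.1 ≤ t then max m x.1 else m) start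

theorem pvBest_foldl_ge {slots : List (Int × Int × String)} {start t m0 : Int} :
    m0 ≤ slots.foldl (fun m x => if start < x.1 ∧ x.1 ≤ t then max m x.1 else m) m0 := by
  induction slots generalizing m0 with
  | nil => simp
  | cons a l ih =>
    simp only [List.foldl_cons]
    refine le_trans ?_ ih
    split <;> simp

theorem pvBest_foldl_le {slots : List (Int × Int × String)} {start t m0 : Int} (h0 : m0 ≤ t) :
    slots.foldl (fun m x => if start < x.1 ∧ x.1 ≤ t then max m x.1 else m) m0 ≤ t := by
  induction slots generalizing m0 with
  | nil => simpa
  | cons a l ih =>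
    simp only [List.foldl_cons]
    apply ih
    split
    · next h => exact max_le h0 h.2
    · exact h0

theorem pvBest_foldl_ge_elem {slots : List (Int × Int × String)} {start t m0 : Int}
    {x : Int × Int × String} (hx : x ∈ slots) (h1 : start < x.1) (h2 : x.1 ≤ t) :
    x.1 ≤ slots.foldl (fun m x => if start < x.1 ∧ x.1 ≤ t then max m x.1 else m) m0 := by
  induction slots generalizing m0 with
  | nil => cases hx
  | cons a l ih =>
    simp only [List.foldl_cons]
    rcases List.mem_cons.mp hx with rfl | hx
    · refine le_trans ?_ pvBest_foldl_ge
      rw [if_pos ⟨h1, h2⟩]; exact le_max_right _ _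
    · exact ih hx

theorem pvBest_foldl_mem {slots : List (Int × Int × String)} {start t m0 : Int} :
    slots.foldl (fun m x => if start < x.1 ∧ x.1 ≤ t then max m x.1 else m) m0 = m0 ∨
    ∃ x ∈ slots, start < x.1 ∧ x.1 ≤ t ∧
      slots.foldl (fun m x => if start < x.1 ∧ x.1 ≤ t then max m x.1 else m) m0 = x.1 := by
  induction slots generalizing m0 with
  | nil => exact Or.inl rfl
  | cons a l ih =>
    simp only [List.foldl_cons]
    by_cases h : start < a.1 ∧ a.1 ≤ t
    · rw [if_pos h]
      rcases @ih (max m0 a.1) with heq | ⟨x, hx, h1, h2, h3⟩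
      · rcases max_cases m0 a.1 with ⟨hm, _⟩ | ⟨hm, _⟩
        · exact Or.inl (heq.trans hm)
        · exact Or.inr ⟨a, List.mem_cons_self, h.1, h.2, heq.trans hm⟩
      · exact Or.inr ⟨x, List.mem_cons_of_mem _ hx, h1, h2, h3⟩
    · rw [if_neg h]
      rcases @ih m0 with heq | ⟨x, hx, h1, h2, h3⟩
      · exact Or.inl heq
      · exact Or.inr ⟨x, List.mem_cons_of_mem _ hx, h1, h2, h3⟩

-- counting monotone along covering implication
theorem pvConcurrent_mono {slots : List (Int × Int × String)} {t t' : Int}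
    (h : ∀ x ∈ slots, (x.1 ≤ t ∧ t < x.2.1) → (x.1 ≤ t' ∧ t' < x.2.1)) :
    pvConcurrentB slots t ≤ pvConcurrentB slots t' := by
  unfold pvConcurrentB
  have := List.countP_mono_left (l := slots)
    (p := fun x => decide (x.1 ≤ t ∧ t < x.2.1)) (q := fun x => decide (x.1 ≤ t' ∧ t' < x.2.1))
    (by intro x hx hp; exact decide_eq_true (h x hx (of_decide_eq_true hp)))
  simpa [← List.countP_eq_length_filter] using this

theorem pvConcurrentA_eq (slots : List (Int × Int × String)) (t : Int) :
    pvConcurrentA slots t = pvConcurrentB slots t := rfl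

-- ===== VERDICT (by name: the statement is the Claim_ definition above) =====
theorem has_capacity_spec : Claim_equal_has_capacity := by
  intro slots cap start end_ _
  unfold Spec_has_capacity has_capacity has_capacity_alt
  rw [pvLoopA_eq]
  by_cases hse : start ≥ end_
  · rw [if_pos hse, PySem.List.pyRange_one_eq_nil hse]; rfl
  · rw [if_neg hse]
    rw [not_le] at hse
    rw [Bool.eq_iff_iff]
    simp only [List.all_eq_true, Bool.not_eq_true', decide_eq_false_iff_not, not_le,
      pvConcurrentA_eq]
    constructor
    · -- every time point ok → every candidate ok
      intro hall t ht
      apply hall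
      rw [PySem.List.mem_pyRange_one]
      rcases List.mem_cons.mp ht with rfl | ht
      · exact ⟨le_refl _, hse⟩
      · rcases List.mem_filterMap.mp ht with ⟨x, _, hx⟩
        split at hx
        · next h => cases hx; exact ⟨le_of_lt h.1, h.2⟩
        · cases hx
    · -- every candidate ok → every time point ok
      intro hall t ht
      rw [PySem.List.mem_pyRange_one] at ht
      set t' := pvBest slots start t with ht'
      have hge : start ≤ t' := pvBest_foldl_ge
      have hle : t' ≤ t := pvBest_foldl_le ht.1
      have hmono : pvConcurrentB slots t ≤ pvConcurrentB slots t' := by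
        apply pvConcurrent_mono
        intro x hx ⟨h1, h2⟩
        refine ⟨?_, lt_of_le_of_lt hle h2⟩
        by_cases hs : start < x.1
        · exact pvBest_foldl_ge_elem hx hs h1
        · exact le_trans (not_lt.mp hs) hge
      have hmem : t' ∈ start :: slots.filterMap
          (fun x => if start < x.1 ∧ x.1 < end_ then some x.1 else none) := by
        rcases pvBest_foldl_mem (slots := slots) (start := start) (t := t) (m0 := start) with heq | ⟨x, hx, h1, h2, h3⟩
        · rw [ht', pvBest, heq]; exact List.mem_cons_self
        · refine List.mem_cons_of_mem _ (List.mem_filterMap.mpr ⟨x, hx, ?_⟩)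
          rw [if_pos ⟨h1, lt_of_le_of_lt h2 ht.2⟩, ht', pvBest, h3]
      exact lt_of_le_of_lt hmono (hall t' hmem)
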